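-- pv_equiv track=rewrite | github.com/sidonai-86/bootcamp-template-main | scripts/transform/transform_x4Luck_earthqueke.py | batch_generator_from_lines
-- ===== SOURCE A (Python) =====
-- def batch_generator_from_lines(lines, batch_size=10):
--     batch = []
--     for line in lines:
--         if line:
--             batch.append(line)
--         if len(batch) == batch_size:
--             yield batch
--             batch = []
--     if batch:
--         yield batch
-- ===== SOURCE B (Python) =====
-- def batch_generator_from_lines(lines, batch_size=10):
--     # Two-phase: filter first, then slice consecutive chunks by index.
--     kept = [x for x in lines if x]
--     for i in range(0, len(kept), batch_size):
--         yield kept[i:i + batch_size]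
-- ===== Notes on version B (the rewrite author's own statement) =====
-- stated objective: simpler
-- what changed: A interleaves filtering, accumulation and flushing in one stateful loop; B first builds the filtered list and then yields it in index slices of batch_size, with no accumulator state.
-- outside the precondition, e.g. on batch_generator_from_lines(['a'], 0): A returns [['a']], B raises ValueError; on batch_generator_from_lines(['a'], -1): A returns [['a']], B returns []
import Mathlib
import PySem

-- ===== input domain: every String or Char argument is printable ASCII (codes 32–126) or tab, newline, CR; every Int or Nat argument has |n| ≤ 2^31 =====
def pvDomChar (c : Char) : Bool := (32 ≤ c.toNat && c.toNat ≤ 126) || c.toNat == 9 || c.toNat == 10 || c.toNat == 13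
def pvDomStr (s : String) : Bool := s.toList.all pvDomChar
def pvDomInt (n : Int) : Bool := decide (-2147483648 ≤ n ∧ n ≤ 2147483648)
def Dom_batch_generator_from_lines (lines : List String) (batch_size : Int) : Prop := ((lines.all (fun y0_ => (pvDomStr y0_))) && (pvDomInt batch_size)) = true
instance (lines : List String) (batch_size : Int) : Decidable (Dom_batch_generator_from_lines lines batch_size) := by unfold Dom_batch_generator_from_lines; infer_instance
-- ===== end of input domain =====

-- B replaces A's single stateful accumulate-and-flush loop by filter-then-slice-by-index (simpler decomposition, same cost).
-- Both Pythons are generators; the equivalence is about the list of yielded batches.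


-- ===== PORT A =====
-- one loop iteration: append the line if non-empty, flush when the batch reaches batch_size
def stepA (batch_size : Int) (st : List (List String) × List String) (line : String) : List (List String) × List String :=
  let batch := if line ≠ "" then st.2 ++ [line] else st.2
  if (batch.length : Int) = batch_size then (st.1 ++ [batch], []) else (st.1, batch)

def batch_generator_from_lines (lines : List String) (batch_size : Int) : List (List String) :=
  let s := lines.foldl (stepA batch_size) ([], [])
  if s.2 ≠ [] then s.1 ++ [s.2] else s.1

-- ===== PORT B =====
def batch_generator_from_lines_alt (lines : List String) (batch_size : Int) : List (List String) :=
  let kept := lines.filter (fun x => x ≠ "")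
  (PySem.List.pyRange 0 (kept.length : Int) batch_size).foldl
    (fun acc i => acc ++ [PySem.List.slice kept (some i) (some (i + batch_size))]) []

-- ===== PRECONDITION & SPEC =====
-- Pre_ excludes non-positive batch_size: there B's range-slicing raises ValueError (step 0) or yields
-- nothing (negative step), while A's values there ([] flushes / one giant batch) are accidents of its loop.
def Pre_batch_generator_from_lines (lines : List String) (batch_size : Int) : Prop := 1 ≤ batch_size
instance (lines : List String) (batch_size : Int) : Decidable (Pre_batch_generator_from_lines lines batch_size) := by unfold Pre_batch_generator_from_lines; infer_instance

def pvWitness_batch_generator_from_lines : List String × Int := (["a", "", "bb", "c"], 2)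

def Spec_batch_generator_from_lines (lines : List String) (batch_size : Int) (out : List (List String)) : Prop := out = batch_generator_from_lines_alt lines batch_size
instance (lines : List String) (batch_size : Int) (out : List (List String)) : Decidable (Spec_batch_generator_from_lines lines batch_size out) := by unfold Spec_batch_generator_from_lines; infer_instance

-- ===== CLAIM (what is proved, stated in full; the proofs are below) =====
def Claim_equal_batch_generator_from_lines : Prop := ∀ (lines : List String) (batch_size : Int), Dom_batch_generator_from_lines lines batch_size → Pre_batch_generator_from_lines lines batch_size → Spec_batch_generator_from_lines lines batch_size (batch_generator_from_lines lines batch_size)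

-- ===== LEMMAS AND PROOFS =====

-- reference chunking: consecutive blocks of k, final short block kept
def chunks (k : Nat) (l : List String) : List (List String) :=
  if h : l = [] ∨ k = 0 then [] else l.take k :: chunks k (l.drop k)
termination_by l.length
decreasing_by
  · cases l with
    | nil => exact absurd (Or.inl rfl) h
    | cons a t => simp; omega

theorem chunks_nil (k : Nat) : chunks k [] = [] := by
  rw [chunks]; simp

theorem chunks_cons (k : Nat) (hk : 0 < k) (l : List String) (hl : l ≠ []) :
    chunks k l = l.take k :: chunks k (l.drop k) := by
  rw [chunks]; simp [hl, Nat.pos_iff_ne_zero.mp hk]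

def finishA (p : List (List String) × List String) : List (List String) :=
  if p.2 ≠ [] then p.1 ++ [p.2] else p.1

theorem stepA_empty (k : Nat) (acc : List (List String)) (b : List String) (hb : b.length < k) :
    stepA (k : Int) (acc, b) "" = (acc, b) := by
  simp only [stepA, ne_eq, not_true_eq_false, if_false]
  rw [if_neg (by omega)]

theorem stepA_full (k : Nat) (acc : List (List String)) (b : List String) (line : String)
    (hline : line ≠ "") (hfull : b.length + 1 = k) :
    stepA (k : Int) (acc, b) line = (acc ++ [b ++ [line]], []) := by
  simp only [stepA, ne_eq, hline, not_false_eq_true, if_true]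
  rw [if_pos (by simp; omega)]

theorem stepA_part (k : Nat) (acc : List (List String)) (b : List String) (line : String)
    (hline : line ≠ "") (hfull : b.length + 1 ≠ k) :
    stepA (k : Int) (acc, b) line = (acc, b ++ [line]) := by
  simp only [stepA, ne_eq, hline, not_false_eq_true, if_true]
  rw [if_neg (by simp; omega)]

theorem finish_A_loop (k : Nat) (hk : 0 < k) :
    ∀ (lines : List String) (acc : List (List String)) (b : List String), b.length < k →
      finishA (lines.foldl (stepA (k : Int)) (acc, b))
      = acc ++ chunks k (b ++ lines.filter (fun x => x ≠ "")) := by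
  intro lines
  induction lines with
  | nil =>
    intro acc b hb
    simp only [List.foldl_nil, List.filter_nil, List.append_nil, finishA]
    by_cases hbe : b = []
    · subst hbe; simp [chunks_nil]
    · rw [chunks_cons k hk b hbe]
      have h1 : b.take k = b := List.take_of_length_le (le_of_lt hb)
      have h2 : b.drop k = [] := List.drop_eq_nil_of_le (le_of_lt hb)
      simp [hbe, h1, h2, chunks_nil]
  | cons line rest ih =>
    intro acc b hb
    by_cases hline : line = ""
    · subst hline
      rw [List.foldl_cons, stepA_empty k acc b hb, ih acc b hb]
      simp
    · have hfilter : (line :: rest).filter (fun x => x ≠ "") = line :: rest.filter (fun x => x ≠ "") := by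
        simp [hline]
      rw [hfilter]
      by_cases hfull : b.length + 1 = k
      · have hlen : (b ++ [line]).length = k := by simp; omega
        have hconc : b ++ line :: rest.filter (fun x => x ≠ "") = (b ++ [line]) ++ rest.filter (fun x => x ≠ "") := by simp
        have hch : chunks k ((b ++ [line]) ++ rest.filter (fun x => x ≠ ""))
            = (b ++ [line]) :: chunks k (rest.filter (fun x => x ≠ "")) := by
          rw [chunks_cons k hk _ (by simp), List.take_left' hlen, List.drop_left' hlen]
        rw [List.foldl_cons, stepA_full k acc b line hline hfull,
          ih (acc ++ [b ++ [line]]) [] hk, hconc, hch]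
        simp
      · rw [List.foldl_cons, stepA_part k acc b line hline hfull,
          ih acc (b ++ [line]) (by simp; omega)]
        simp

theorem chunks_eq_map (k : Nat) (hk : 0 < k) (l : List String) :
    chunks k l = (List.range ((l.length + k - 1) / k)).map (fun j => (l.drop (k * j)).take k) := by
  by_cases hl : l = []
  · subst hl
    simp [chunks_nil]
    omega
  · rw [chunks_cons k hk l hl]
    have hlen : 0 < l.length := List.length_pos_iff.mpr hl
    have hm : (l.length + k - 1) / k = ((l.drop k).length + k - 1) / k + 1 := by
      rw [List.length_drop]
      rcases Nat.lt_or_ge (l.length) (k + 1) with h | h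
      · have h1 : l.length - k = 0 := by omega
        rw [h1]
        have h2 : l.length + k - 1 = (l.length - 1) + k := by omega
        rw [h2, Nat.add_div_right _ hk, Nat.div_eq_of_lt (by omega),
          Nat.div_eq_of_lt (by omega)]
      · have h1 : l.length + k - 1 = (l.length - 1) + k := by omega
        have h2 : l.length - k + k - 1 = (l.length - k - 1) + k := by omega
        rw [h1, h2, Nat.add_div_right _ hk, Nat.add_div_right _ hk]
        have h3 : l.length - 1 = (l.length - k - 1) + k := by omega
        rw [h3, Nat.add_div_right _ hk]
    rw [hm, List.range_succ_eq_map, List.map_cons, List.map_map,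
      chunks_eq_map k hk (l.drop k)]
    refine congrArg₂ List.cons (by simp) ?_
    refine List.map_congr_left (fun j _ => ?_)
    simp only [Function.comp_apply]
    rw [List.drop_drop]
    have harg : k + k * j = k * j.succ := by rw [Nat.succ_eq_add_one]; ring
    rw [harg]
termination_by l.length
decreasing_by
  cases l with
  | nil => exact absurd rfl hl
  | cons a t => simp; omega

theorem alt_nat (kept : List String) (k : Nat) (hk : 0 < k) :
    (PySem.List.pyRange 0 (kept.length : Int) ((k : Nat) : Int)).foldl
      (fun acc i => acc ++ [PySem.List.slice kept (some i) (some (i + ((k : Nat) : Int)))]) []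
    = chunks k kept := by
  rw [PySem.List.pyRange_of_pos 0 (kept.length : Int) (by exact_mod_cast hk)]
  have hcount : (if (0 : Int) < (kept.length : Int) then
        (((kept.length : Int) - 0 + (k : Int) - 1) / (k : Int)).toNat else 0)
      = (kept.length + k - 1) / k := by
    by_cases h0 : 0 < kept.length
    · rw [if_pos (by exact_mod_cast h0)]
      have h1 : (kept.length : Int) - 0 + (k : Int) - 1 = ((kept.length + k - 1 : Nat) : Int) := by
        omega
      rw [h1, ← Int.natCast_ediv, Int.toNat_natCast]
    · have hn0 : kept.length = 0 := by omega
      rw [if_neg (by omega), hn0]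
      rw [Nat.div_eq_of_lt (by omega)]
  rw [hcount, List.foldl_map, chunks_eq_map k hk kept,
    PySem.List.foldl_append_singleton_eq_map]
  refine List.map_congr_left (fun j _ => ?_)
  have h1 : (0 : Int) + (k : Int) * (j : Int) = ((k * j : Nat) : Int) := by push_cast; ring
  rw [h1]
  have h2 : ((k * j : Nat) : Int) + (k : Int) = ((k * j + k : Nat) : Int) := by push_cast; ring
  rw [h2, PySem.List.slice_natCast]
  congr 1
  omega

theorem alt_eq_chunks (lines : List String) (batch_size : Int) (hbs : 1 ≤ batch_size) :
    batch_generator_from_lines_alt lines batch_size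
      = chunks batch_size.toNat (lines.filter (fun x => x ≠ "")) := by
  have hbsk : batch_size = ((batch_size.toNat : Nat) : Int) := by omega
  show (PySem.List.pyRange 0 (((lines.filter (fun x => x ≠ "")).length : Nat) : Int) batch_size).foldl
      (fun acc i => acc ++ [PySem.List.slice (lines.filter (fun x => x ≠ "")) (some i) (some (i + batch_size))]) []
    = chunks batch_size.toNat (lines.filter (fun x => x ≠ ""))
  rw [hbsk]
  exact alt_nat (lines.filter (fun x => x ≠ "")) batch_size.toNat (by omega)

-- ===== VERDICT (by name: the statement is the Claim_ definition above) =====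
theorem batch_generator_from_lines_spec : Claim_equal_batch_generator_from_lines := by
  intro lines batch_size _ hpre
  have hbs : 1 ≤ batch_size := hpre
  unfold Spec_batch_generator_from_lines
  rw [alt_eq_chunks lines batch_size hbs]
  have hbsk : batch_size = ((batch_size.toNat : Nat) : Int) := by omega
  show finishA (lines.foldl (stepA batch_size) ([], [])) = _
  rw [hbsk]
  exact finish_A_loop batch_size.toNat (by omega) lines [] [] (by simp; omega)
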